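-- pv_equiv track=rewrite | github.com/HyunDooBoo/BOJ | 브루트포스/사탕 게임 (3085)/사탕 게임 (3085).py | check
-- ===== SOURCE A (Python) =====
-- def check(array):
--     ans = 1
--     for i in range(len(array)):
--         count = 1
--         for j in range(1, len(array)):
--             if array[i][j] == array[i][j-1]:
--                 count += 1
--             else:
--                 count = 1
--             ans = max(ans, count)
--
--         count = 1
--         for j in range(1,len(array)):
--             if array[j][i] == array[j-1][i]:
--                 count += 1
--             else:
--                 count = 1
--             ans = max(ans, count)
--
--     return ans
-- ===== SOURCE B (Python) =====
-- def _anchored(v, rest):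
--     """Length of the prefix of rest consisting of values equal to v."""
--     k = 0
--     for x in rest:
--         if x != v:
--             break
--         k += 1
--     return k
--
-- def _best(line):
--     """Longest run of equal values: over each suffix, 1 + the anchored run after its head."""
--     best = 1
--     rest = line
--     while rest:
--         head, rest = rest[0], rest[1:]
--         best = max(best, 1 + _anchored(head, rest))
--     return best
--
-- def check(array):
--     n = len(array)
--     if n <= 1:
--         return 1
--     lines = [[array[i][j] for j in range(n)] for i in range(n)] + \
--             [[array[j][i] for j in range(n)] for i in range(n)]
--     return max(_best(line) for line in lines)
-- ===== Notes on version B (the rewrite author's own statement) =====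
-- stated objective: alternative
-- what changed: Instead of A's single adjacent-equality pass with a reset-on-mismatch counter, B materialises each row/column, and for every suffix counts the anchored run of values equal to that suffix's head, taking the maximum of these anchored runs.
import Mathlib
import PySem

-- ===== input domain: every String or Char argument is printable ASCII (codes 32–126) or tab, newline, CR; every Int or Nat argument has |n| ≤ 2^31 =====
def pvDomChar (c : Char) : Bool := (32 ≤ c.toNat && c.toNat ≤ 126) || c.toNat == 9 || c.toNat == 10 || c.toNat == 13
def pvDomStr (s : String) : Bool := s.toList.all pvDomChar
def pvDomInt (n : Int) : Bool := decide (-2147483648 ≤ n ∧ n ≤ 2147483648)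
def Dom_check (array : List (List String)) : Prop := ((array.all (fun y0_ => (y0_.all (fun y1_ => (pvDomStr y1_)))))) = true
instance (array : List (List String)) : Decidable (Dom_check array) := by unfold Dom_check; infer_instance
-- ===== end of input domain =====

-- B replaces A's adjacent-equality reset-counter pass by, for every suffix of each row/column,
-- counting the anchored run equal to that suffix's head and maximising; equal on non-ragged grids.

-- shared helper: array[i][j] (Python raises where pyGet? is none; the "" default is
-- only reached outside Pre_check, where Python A and B both raise IndexError)
def cell (array : List (List String)) (i j : Int) : String :=
  match PySem.List.pyGet? array i with
  | some row => (PySem.List.pyGet? row j).getD ""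
  | none => ""

-- ===== PORT A =====
def check (array : List (List String)) : Int :=
  (PySem.List.pyRange 0 (array.length : Int) 1).foldl (fun ans i =>
    let p1 := (PySem.List.pyRange 1 (array.length : Int) 1).foldl
        (fun (p : Int × Int) j =>
          let count := if cell array i j == cell array i (j - 1) then p.2 + 1 else 1
          (max p.1 count, count)) (ans, 1)
    let p2 := (PySem.List.pyRange 1 (array.length : Int) 1).foldl
        (fun (p : Int × Int) j =>
          let count := if cell array j i == cell array (j - 1) i then p.2 + 1 else 1
          (max p.1 count, count)) (p1.1, 1)
    p2.1) 1

-- ===== PORT B =====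
-- _anchored: the for-with-break loop becomes structural recursion (break = stop)
def anchored (v : String) : List String → Int
  | [] => 0
  | x :: xs => if x != v then 0 else 1 + anchored v xs

-- _best: the while loop over ever-shorter suffixes, `best` as accumulator
def bestLine : Int → List String → Int
  | best, [] => best
  | best, x :: xs => bestLine (max best (1 + anchored x xs)) xs

def check_alt (array : List (List String)) : Int :=
  let n := array.length
  if n ≤ 1 then 1
  else
    let lines := (List.range n).map (fun (i : Nat) => (List.range n).map (fun (j : Nat) => cell array (i : Int) (j : Int)))
              ++ (List.range n).map (fun (i : Nat) => (List.range n).map (fun (j : Nat) => cell array (j : Int) (i : Int)))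
    match lines with
    | [] => 1  -- unreachable: n ≥ 2, so `lines` is nonempty (Python's max over a nonempty generator)
    | l :: ls => ls.foldl (fun b line => max b (bestLine 1 line)) (bestLine 1 l)

-- ===== PRECONDITION & SPEC =====
-- Pre_check excludes exactly the ragged grids on which Python A (and B) raise
-- IndexError: for n = len(array) ≥ 2 every row must have at least n entries.
def Pre_check (array : List (List String)) : Prop :=
  array.length ≤ 1 ∨ ∀ row ∈ array, array.length ≤ row.length
instance (array : List (List String)) : Decidable (Pre_check array) := by unfold Pre_check; infer_instance

def pvWitness_check : List (List String) := [["a", "a"], ["b", "a"]]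

def Spec_check (array : List (List String)) (out : Int) : Prop := out = check_alt array
instance (array : List (List String)) (out : Int) : Decidable (Spec_check array out) := by unfold Spec_check; infer_instance

-- ===== CLAIM (what is proved, stated in full; the proofs are below) =====
def Claim_equal_check : Prop := ∀ (array : List (List String)), Dom_check array → Pre_check array → Spec_check array (check array)

-- ===== LEMMAS AND PROOFS =====

-- A's inner-loop state machine, recast as a recursion on the list of line values
def AL (prev : String) (a c : Int) : List String → Int
  | [] => a
  | x :: xs => AL x (max a (if x == prev then c + 1 else 1)) (if x == prev then c + 1 else 1) xs

theorem AL_ge (xs : List String) : ∀ prev a c, a ≤ AL prev a c xs := by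
  induction xs with
  | nil => intro prev a c; simp [AL]
  | cons x xs ih =>
    intro prev a c
    exact le_trans (le_max_left _ _) (ih x _ _)

theorem AL_pull (xs : List String) : ∀ prev a b c, AL prev (max a b) c xs = max a (AL prev b c xs) := by
  induction xs with
  | nil => intro prev a b c; simp [AL]
  | cons x xs ih =>
    intro prev a b c
    simp only [AL, max_assoc, ih]

-- key bridge: a streaming pass whose pending run has length c equals the anchored
-- run of the previous value (c + anchored) maxed with a fresh streaming pass
theorem AL_anchored (ys : List String) :
    ∀ v c, 1 ≤ c → AL v c c ys = max (c + anchored v ys) (AL v 1 1 ys) := by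
  induction ys with
  | nil => intro v c hc; simp [AL, anchored]; omega
  | cons y t ih =>
    intro v c hc
    by_cases h : y = v
    · subst h
      simp only [AL, anchored, bne_self_eq_false, Bool.false_eq_true, if_false,
        beq_self_eq_true, if_true]
      rw [show max c (c + 1) = c + 1 by omega, show max (1:Int) (1 + 1) = 1 + 1 by omega,
        ih y (c + 1) (by omega), ih y (1 + 1) (by omega)]
      omega
    · have hb : (y == v) = false := beq_eq_false_iff_ne.2 h
      simp only [AL, anchored, hb, bne, Bool.not_false, Bool.false_eq_true, if_false, if_true]
      rw [show max c (1:Int) = max c 1 from rfl]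
      have := AL_pull t y c 1 1
      rw [show max (1:Int) 1 = 1 by omega, show max c (1:Int) = c by omega] at *
      rw [this]
      omega

-- B's suffix loop computes the same maximum as A's streaming pass over the tail
theorem bestLine_AL (xs : List String) :
    ∀ x a, bestLine a (x :: xs) = max a (AL x 1 1 xs) := by
  induction xs with
  | nil => intro x a; simp [bestLine, anchored, AL]
  | cons y ys ih =>
    intro x a
    rw [show bestLine a (x :: y :: ys) = bestLine (max a (1 + anchored x (y :: ys))) (y :: ys)
      from rfl, ih]
    by_cases h : y = x
    · subst h
      have hA : AL y 1 1 (y :: ys) = max (2 + anchored y ys) (AL y 1 1 ys) := by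
        simp only [AL, beq_self_eq_true, if_true]
        rw [show max (1:Int) (1 + 1) = 2 by omega, show (1:Int) + 1 = 2 by omega]
        exact AL_anchored ys y 2 (by omega)
      have ha : anchored y (y :: ys) = 1 + anchored y ys := by
        simp [anchored]
      rw [hA, ha]
      omega
    · have hb : (y == x) = false := beq_eq_false_iff_ne.2 h
      have hA : AL x 1 1 (y :: ys) = AL y 1 1 ys := by
        simp only [AL, hb, Bool.false_eq_true, if_false]
        rw [show max (1:Int) 1 = 1 by omega]
      have ha : anchored x (y :: ys) = 0 := by
        simp [anchored, bne, hb]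
      have h1 : (1:Int) ≤ AL y 1 1 ys := AL_ge ys y 1 1
      rw [hA, ha]
      omega

-- the index-based inner fold of A equals AL on the mapped values
theorem idx_AL (f : Int → String) :
    ∀ (k s : Nat) (a c : Int),
      (((List.range' (s + 1) k).map (fun (j : Nat) => (j : Int))).foldl
        (fun (p : Int × Int) j =>
          let count := if f j == f (j - 1) then p.2 + 1 else 1
          (max p.1 count, count)) (a, c)).1
      = AL (f s) a c ((List.range' (s + 1) k).map (fun (j : Nat) => f (j : Int))) := by
  intro k
  induction k with
  | zero => intro s a c; simp [AL]
  | succ k ih =>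
    intro s a c
    rw [List.range'_succ]
    simp only [List.map_cons, List.foldl_cons]
    simp only [Nat.cast_add, Nat.cast_one]
    rw [ih (s + 1)]
    simp [AL]

-- interleaved max-folds = sequential max-folds
theorem pull_max (h : Nat → Int) (l : List Nat) :
    ∀ a x, l.foldl (fun b i => max b (h i)) (max a x) = max (l.foldl (fun b i => max b (h i)) a) x := by
  induction l with
  | nil => intro a x; rfl
  | cons i l ih =>
    intro a x
    simp only [List.foldl_cons]
    rw [show max (max a x) (h i) = max (max a (h i)) x by omega, ih]

theorem interleave_max (f g : Nat → Int) (l : List Nat) :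
    ∀ a, l.foldl (fun b i => max (max b (f i)) (g i)) a
      = l.foldl (fun b i => max b (g i)) (l.foldl (fun b i => max b (f i)) a) := by
  induction l with
  | nil => intro a; rfl
  | cons i l ih =>
    intro a
    simp only [List.foldl_cons]
    rw [ih, pull_max f l, pull_max g l]

theorem foldl_inv_congr {α : Type} (P : Int → Prop) (F G : Int → α → Int) :
    ∀ (l : List α) (a : Int), P a → (∀ b x, P b → F b x = G b x ∧ P (F b x)) →
      l.foldl F a = l.foldl G a := by
  intro l
  induction l with
  | nil => intro a _ _; rfl
  | cons x l ih =>
    intro a ha hFG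
    simp only [List.foldl_cons]
    rw [(hFG a x ha).1]
    exact ih _ (by rw [← (hFG a x ha).1]; exact (hFG a x ha).2) hFG

-- pyRange bridges
theorem pyRange_zero_nat' (n : Nat) :
    PySem.List.pyRange 0 (n : Int) 1 = (List.range n).map (fun (k : Nat) => (k : Int)) := by
  rw [PySem.List.pyRange_one]
  simp

theorem pyRange_one_nat' (n : Nat) :
    PySem.List.pyRange 1 (n : Int) 1 = (List.range' 1 (n - 1)).map (fun (j : Nat) => (j : Int)) := by
  rw [PySem.List.pyRange_one]
  have h : ((n : Int) - 1).toNat = n - 1 := by omega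
  rw [h, List.range'_eq_map_range]
  simp only [List.map_map]
  apply List.map_congr_left
  intro k _
  simp

-- AL with accumulator ≥ 1 pulls the accumulator out
theorem AL_shift (prev : String) (a : Int) (xs : List String) (ha : 1 ≤ a) :
    AL prev a 1 xs = max a (AL prev 1 1 xs) := by
  have := AL_pull xs prev a 1 1
  rwa [max_eq_left ha] at this

-- maximal run length of a line (head value, tail values)
def Mline (hd : String) (tl : List String) : Int := AL hd 1 1 tl

def rowTl (array : List (List String)) (n i : Nat) : List String :=
  (List.range' 1 (n - 1)).map (fun (j : Nat) => cell array (i : Int) (j : Int))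

def colTl (array : List (List String)) (n i : Nat) : List String :=
  (List.range' 1 (n - 1)).map (fun (j : Nat) => cell array (j : Int) (i : Int))

def MrD (array : List (List String)) (n i : Nat) : Int :=
  Mline (cell array (i : Int) 0) (rowTl array n i)

def McD (array : List (List String)) (n i : Nat) : Int :=
  Mline (cell array 0 (i : Int)) (colTl array n i)

-- A's result in canonical form
theorem A_char (array : List (List String)) :
    check array = (List.range array.length).foldl
      (fun a i => max (max a (MrD array array.length i)) (McD array array.length i)) 1 := by
  unfold check
  rw [pyRange_zero_nat', List.foldl_map]
  simp only [pyRange_one_nat']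
  apply foldl_inv_congr (fun a => 1 ≤ a)
  · exact le_refl 1
  · intro b i hb
    have hrow := idx_AL (fun j => cell array (i : Int) j) (array.length - 1) 0 b 1
    simp only [Nat.cast_zero, Nat.zero_add] at hrow
    have hcol := idx_AL (fun j => cell array j (i : Int)) (array.length - 1) 0
      (AL (cell array (i : Int) 0) b 1
        ((List.range' 1 (array.length - 1)).map (fun (j : Nat) => cell array (i : Int) (j : Int)))) 1
    simp only [Nat.cast_zero, Nat.zero_add] at hcol
    constructor
    · simp only [hrow, hcol]
      rw [AL_shift _ _ _ (le_trans hb (AL_ge _ _ _ _)), AL_shift _ _ _ hb]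
      simp [MrD, McD, Mline, rowTl, colTl]
    · simp only [hrow, hcol]
      exact le_trans hb (le_trans (AL_ge _ _ _ _) (AL_ge _ _ _ _))

-- fold a pointwise-equal per-index value through a max-fold
theorem foldl_max_congr (h1 h2 : Nat → Int) (he : ∀ i, h1 i = h2 i) :
    ∀ (l : List Nat) (a : Int),
      l.foldl (fun b i => max b (h1 i)) a = l.foldl (fun b i => max b (h2 i)) a := by
  intro l
  induction l with
  | nil => intro a; rfl
  | cons i l ih => intro a; simp only [List.foldl_cons, he]

-- B's per-line value on a materialised row/column is the canonical run maximum
theorem bestLine_row (array : List (List String)) (m i : Nat) :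
    bestLine 1 ((List.range (m + 2)).map (fun (j : Nat) => cell array (i : Int) (j : Int)))
      = MrD array (m + 2) i := by
  have hsplit : List.range (m + 2) = 0 :: List.range' 1 (m + 1) := by
    rw [List.range_eq_range']; rfl
  rw [hsplit]
  simp only [List.map_cons, Nat.cast_zero]
  rw [bestLine_AL]
  have h1 : (1:Int) ≤ AL (cell array (i : Int) 0) 1 1
      ((List.range' 1 (m + 1)).map (fun (j : Nat) => cell array (i : Int) (j : Int))) :=
    AL_ge _ _ _ _
  simp only [MrD, Mline, rowTl, show m + 2 - 1 = m + 1 from rfl]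
  omega

theorem bestLine_col (array : List (List String)) (m i : Nat) :
    bestLine 1 ((List.range (m + 2)).map (fun (j : Nat) => cell array (j : Int) (i : Int)))
      = McD array (m + 2) i := by
  have hsplit : List.range (m + 2) = 0 :: List.range' 1 (m + 1) := by
    rw [List.range_eq_range']; rfl
  rw [hsplit]
  simp only [List.map_cons, Nat.cast_zero]
  rw [bestLine_AL]
  have h1 : (1:Int) ≤ AL (cell array 0 (i : Int)) 1 1
      ((List.range' 1 (m + 1)).map (fun (j : Nat) => cell array (j : Int) (i : Int))) :=
    AL_ge _ _ _ _
  simp only [McD, Mline, colTl, show m + 2 - 1 = m + 1 from rfl]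
  omega

-- B's result in canonical form
theorem B_char (array : List (List String)) (h2 : 2 ≤ array.length) :
    check_alt array = (List.range array.length).foldl
      (fun a i => max a (McD array array.length i))
      ((List.range array.length).foldl (fun a i => max a (MrD array array.length i)) 1) := by
  obtain ⟨m, hm2⟩ : ∃ m, array.length = m + 2 := ⟨array.length - 2, by omega⟩
  simp only [check_alt]
  rw [hm2, if_neg (by omega)]
  have hr0 : List.range (m + 2) = 0 :: List.range' 1 (m + 1) := by
    rw [List.range_eq_range']; rfl
  rw [show (List.range (m + 2)).map (fun (i : Nat) => (List.range (m + 2)).map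
        (fun (j : Nat) => cell array (i : Int) (j : Int)))
      = (List.range (m + 2)).map (fun (j : Nat) => cell array ((0:Nat) : Int) (j : Int))
        :: (List.range' 1 (m + 1)).map (fun (i : Nat) => (List.range (m + 2)).map
          (fun (j : Nat) => cell array (i : Int) (j : Int))) from by rw [hr0]; rfl]
  simp only [List.cons_append, List.foldl_append, List.foldl_map]
  rw [foldl_max_congr _ _ (bestLine_row array m), foldl_max_congr _ _ (bestLine_col array m),
    bestLine_row array m 0]
  have h01 : (1:Int) ≤ MrD array (m + 2) 0 := by
    simp only [MrD, Mline]; exact AL_ge _ _ _ _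
  rw [hr0]
  simp only [List.foldl_cons]
  rw [show max (1:Int) (MrD array (m + 2) 0) = MrD array (m + 2) 0 by omega]

-- ===== VERDICT (by name: the statement is the Claim_ definition above) =====
theorem check_spec : Claim_equal_check := by
  unfold Claim_equal_check Spec_check
  intro array _ _
  by_cases hm : array.length ≤ 1
  · have halt : check_alt array = 1 := by
      unfold check_alt
      simp [hm]
    rw [halt]
    unfold check
    rcases Nat.le_one_iff_eq_zero_or_eq_one.mp hm with h | h <;> rw [h]
    · norm_num [PySem.List.pyRange_one_eq_nil]
    · norm_num [PySem.List.pyRange_one_eq_nil, PySem.List.pyRange_one_singleton]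
  · rw [A_char, B_char array (by omega)]
    exact interleave_max (fun i => MrD array array.length i) (fun i => McD array array.length i)
      (List.range array.length) 1
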